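-- pv_equiv track=rewrite | github.com/lbvalcke/Classwork | lbvalcke-master-122/lbvalcke-master-a3fa9d442dc280c08a0ff3fd54751bb1bdff6871/kattis/engineeringenglish.py | solve
-- ===== SOURCE A (Python) =====
-- def solve(lines):
--     # YOUR CODE HERE
--     eng_dict = {}
--     duplicates = []
--     split_lines = [line.split() for line in lines]
--
--     words = [word for line in split_lines for word in line]
--
--     lc_words = [word.lower() for word in  words]
--
--     for i, lines in enumerate(split_lines):
--         for j, word in enumerate(lines):
--             lc_word = word.lower()
--             index = (i, j)
--             eng_dict[lc_word] = eng_dict.setdefault(lc_word, [])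
--             eng_dict[lc_word].append(index)
--
--     for word in eng_dict:
--         if len(eng_dict[word]) > 1:
--             duplicates.append(eng_dict[word][1:len(eng_dict[word])])
--
--     for duplicate in duplicates:
--         if len(duplicate) > 1:
--             for i, index in enumerate(duplicate):
--                 split_lines[duplicate[i][0]][duplicate[i][1]] = "."
--         if len(duplicate) == 1:
--             split_lines[duplicate[0][0]][duplicate[0][1]] = "."
--
--     new_lines = [' '.join(line) for line in split_lines]
--     # Replace [] with the list of processed strings
--
--     return new_lines
-- ===== SOURCE B (Python) =====
-- def solve(lines):
--     seen = set()
--     out = []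
--     for line in lines:
--         words = []
--         for w in line.split():
--             lc = w.lower()
--             if lc in seen:
--                 words.append(".")
--             else:
--                 seen.add(lc)
--                 words.append(w)
--         out.append(' '.join(words))
--     return out
-- ===== Notes on version B (the rewrite author's own statement) =====
-- stated objective: simpler
-- what changed: Replaces A's three extra passes (a dict mapping each lowercased word to all its (line,word) positions, a 'duplicates' list of position tails, and an in-place dotting pass over those positions) by one single pass that keeps a set of already-seen lowercased words and emits '.' or the word directly.
import Mathlib
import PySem

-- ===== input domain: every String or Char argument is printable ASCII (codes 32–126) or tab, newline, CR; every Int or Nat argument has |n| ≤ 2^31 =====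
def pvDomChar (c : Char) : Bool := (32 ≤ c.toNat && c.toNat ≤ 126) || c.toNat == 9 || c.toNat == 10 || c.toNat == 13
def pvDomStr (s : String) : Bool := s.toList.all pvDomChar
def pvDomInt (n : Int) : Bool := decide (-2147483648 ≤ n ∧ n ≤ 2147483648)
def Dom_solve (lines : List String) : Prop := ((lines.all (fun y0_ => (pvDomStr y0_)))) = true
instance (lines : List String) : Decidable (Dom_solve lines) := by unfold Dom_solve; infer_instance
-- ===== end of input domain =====

-- B replaces A's multi-pass positional-index dict / duplicates machinery by a single pass with a
-- set of already-seen lowercased words; objective: simpler (and a measured constant-factor speedup).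

-- ===== PORT A =====
def solve (lines : List String) : List String :=
  let split_lines : List (List String) := lines.map (fun line => PySem.Str.split₀ line)
  let words : List String := split_lines.flatMap (fun line => line)
  let _lc_words : List String := words.map (fun w => PySem.Str.lower w)  -- dead in A too
  let eng_dict : PySem.Dict String (List (Int × Int)) :=
    (PySem.List.enumerate split_lines 0).foldl (fun d p =>
      (PySem.List.enumerate p.2 0).foldl (fun d q =>
        d.modify (PySem.Str.lower q.2) [] (fun l => l ++ [(p.1, q.1)])) d) PySem.Dict.empty
  let duplicates : List (List (Int × Int)) :=
    eng_dict.keys.foldl (fun acc w =>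
      if (eng_dict.getD w []).length > 1 then acc ++ [(eng_dict.getD w []).drop 1] else acc) []
  let split_lines : List (List String) := duplicates.foldl (fun sl dup =>
    let sl1 := if dup.length > 1 then
        (PySem.List.enumerate dup 0).foldl (fun sl e =>
          let p := PySem.List.pyGetD dup e.1 (0, 0)
          PySem.List.pySetD sl p.1 (PySem.List.pySetD (PySem.List.pyGetD sl p.1 []) p.2 ".")) sl
      else sl
    let sl2 := if dup.length == 1 then
        let p := PySem.List.pyGetD dup 0 (0, 0)
        PySem.List.pySetD sl1 p.1 (PySem.List.pySetD (PySem.List.pyGetD sl1 p.1 []) p.2 ".")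
      else sl1
    sl2) split_lines
  split_lines.map (fun line => PySem.Str.join " " line)

-- ===== PORT B =====
def solve_alt (lines : List String) : List String :=
  (lines.foldl (fun (st : PySem.Set String × List String) line =>
      let inner := (PySem.Str.split₀ line).foldl
        (fun (st2 : PySem.Set String × List String) w =>
          let lc := PySem.Str.lower w
          if st2.1.contains lc then (st2.1, st2.2 ++ ["."])
          else (PySem.Set.add st2.1 lc, st2.2 ++ [w])) (st.1, [])
      (inner.1, st.2 ++ [PySem.Str.join " " inner.2])) (PySem.Set.empty, [])).2

-- ===== PRECONDITION & SPEC =====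
def Spec_solve (lines : List String) (out : List String) : Prop := out = solve_alt lines
instance (lines : List String) (out : List String) : Decidable (Spec_solve lines out) := by unfold Spec_solve; infer_instance

-- ===== CLAIM (what is proved, stated in full; the proofs are below) =====
def Claim_equal_solve : Prop := ∀ (lines : List String), Dom_solve lines → Spec_solve lines (solve lines)

-- ===== LEMMAS AND PROOFS =====

-- the single write A's last loop performs
def pvStep (sl : List (List String)) (p : Int × Int) : List (List String) :=
  PySem.List.pySetD sl p.1 (PySem.List.pySetD (PySem.List.pyGetD sl p.1 []) p.2 ".")

theorem pvGroupApp (dup : List (Int × Int)) (sl : List (List String)) :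
    (let sl1 := if dup.length > 1 then
        (PySem.List.enumerate dup 0).foldl (fun sl e =>
          let p := PySem.List.pyGetD dup e.1 (0, 0)
          PySem.List.pySetD sl p.1 (PySem.List.pySetD (PySem.List.pyGetD sl p.1 []) p.2 ".")) sl
      else sl
     let sl2 := if dup.length == 1 then
        let p := PySem.List.pyGetD dup 0 (0, 0)
        PySem.List.pySetD sl1 p.1 (PySem.List.pySetD (PySem.List.pyGetD sl1 p.1 []) p.2 ".")
      else sl1
     sl2) = dup.foldl pvStep sl := by
  match dup with
  | [] => simp
  | [p] => simp [pvStep, PySem.List.pyGetD, PySem.List.pyGet?, PySem.List.pyIdx?]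
  | p :: q :: rest =>
    have hlen : (p :: q :: rest).length > 1 := by simp
    simp only [if_pos hlen]
    have h1 : ((p :: q :: rest).length == 1) = false := by simp
    rw [h1]
    simp only [Bool.false_eq_true, if_false]
    rw [PySem.List.enumerate_eq_map_pyRange (p :: q :: rest) ((0:Int),(0:Int)), List.foldl_map]
    exact PySem.List.foldl_pyRange_zero_pyGetD (p :: q :: rest) ((0:Int),(0:Int)) pvStep sl

def pvGrp (l : List (String × (Int × Int))) (k : String) : List (Int × Int) :=
  (l.filter (fun q => q.1 == k)).map (·.2)

def pvDup (l : List (String × (Int × Int))) : List (Int × Int) :=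
  (((PySem.Set.ofList (l.map (·.1))).filter (fun w => (pvGrp l w).length > 1)).map
    (fun w => (pvGrp l w).drop 1)).flatten

theorem pvGrp_mem {l k q} (h : q ∈ pvGrp l k) : ∃ e ∈ l, e.1 = k ∧ e.2 = q := by
  simp only [pvGrp, List.mem_map, List.mem_filter] at h
  obtain ⟨e, ⟨he, hk⟩, hq⟩ := h
  exact ⟨e, he, by simpa using hk, hq⟩

theorem pv_mem_drop_one {t₁ t₂ : List (String × (Int × Int))} {k p}
    (hnd : ((t₁ ++ (k, p) :: t₂).map (·.2)).Nodup) :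
    p ∈ (pvGrp (t₁ ++ (k, p) :: t₂) k).drop 1 ↔ k ∈ t₁.map (·.1) := by
  have hdec : pvGrp (t₁ ++ (k, p) :: t₂) k = pvGrp t₁ k ++ p :: pvGrp t₂ k := by
    simp [pvGrp, List.filter_append]
  have hnotp2 : p ∉ pvGrp t₂ k := by
    intro hp
    obtain ⟨e, he, _, hq⟩ := pvGrp_mem hp
    have hpm : p ∈ t₂.map (·.2) := List.mem_map.2 ⟨e, he, hq⟩
    simp only [List.map_append, List.map_cons, List.nodup_append] at hnd
    exact (List.nodup_cons.1 hnd.2.1).1 hpm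
  constructor
  · intro hp
    rw [hdec] at hp
    cases hg : pvGrp t₁ k with
    | nil => rw [hg] at hp; simp at hp; exact absurd hp hnotp2
    | cons x xs =>
      have : x ∈ pvGrp t₁ k := by rw [hg]; simp
      obtain ⟨e, he, hk, _⟩ := pvGrp_mem this
      exact List.mem_map.2 ⟨e, he, hk⟩
  · intro hk'
    obtain ⟨e, he, hke⟩ := List.mem_map.1 hk'
    have : e.2 ∈ pvGrp t₁ k := by
      simp only [pvGrp, List.mem_map]
      exact ⟨e, List.mem_filter.2 ⟨he, by simp [hke]⟩, rfl⟩
    rw [hdec]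
    cases hg : pvGrp t₁ k with
    | nil => rw [hg] at this; simp at this
    | cons x xs => simp

theorem pv_unique_key {t₁ t₂ : List (String × (Int × Int))} {k p w}
    (hnd : ((t₁ ++ (k, p) :: t₂).map (·.2)).Nodup)
    (e : String × (Int × Int)) (he : e ∈ t₁ ++ (k, p) :: t₂) (h1 : e.1 = w) (h2 : e.2 = p) :
    w = k := by
  simp only [List.map_append, List.map_cons, List.nodup_append] at hnd
  rcases List.mem_append.1 he with h | h
  · exact absurd rfl (hnd.2.2 p (List.mem_map.2 ⟨e, h, h2⟩) p (by simp))
  · rcases List.mem_cons.1 h with h | h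
    · rw [← h1, h]
    · exact absurd (List.mem_map.2 ⟨e, h, h2⟩) (List.nodup_cons.1 hnd.2.1).1

theorem pv_mem_dup {t₁ t₂ : List (String × (Int × Int))} {k p}
    (hnd : ((t₁ ++ (k, p) :: t₂).map (·.2)).Nodup) :
    p ∈ pvDup (t₁ ++ (k, p) :: t₂) ↔ k ∈ t₁.map (·.1) := by
  constructor
  · intro hp
    obtain ⟨x, hx, hpx⟩ := List.mem_flatten.1 hp
    obtain ⟨w, hw, hxw⟩ := List.mem_map.1 hx
    subst hxw
    have hpg : p ∈ pvGrp (t₁ ++ (k, p) :: t₂) w := List.mem_of_mem_drop hpx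
    obtain ⟨e, he, h1, h2⟩ := pvGrp_mem hpg
    have := pv_unique_key hnd e he h1 h2
    subst this
    exact (pv_mem_drop_one hnd).1 hpx
  · intro hk
    have hp1 : p ∈ (pvGrp (t₁ ++ (k, p) :: t₂) k).drop 1 := (pv_mem_drop_one hnd).2 hk
    refine List.mem_flatten.2 ⟨(pvGrp (t₁ ++ (k, p) :: t₂) k).drop 1, List.mem_map.2 ⟨k, ?_, rfl⟩, hp1⟩
    refine List.mem_filter.2 ⟨(PySem.Set.mem_ofList _ _).2 (List.mem_map.2 ⟨(k, p), by simp, rfl⟩), ?_⟩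
    have : (pvGrp (t₁ ++ (k, p) :: t₂) k).length ≥ 2 := by
      have h2 : ((pvGrp (t₁ ++ (k, p) :: t₂) k).drop 1).length = (pvGrp (t₁ ++ (k, p) :: t₂) k).length - 1 := List.length_drop
      have hne : (pvGrp (t₁ ++ (k, p) :: t₂) k).drop 1 ≠ [] := fun h => by simp [h] at hp1
      have := List.length_pos_of_ne_nil hne
      omega
    simpa using this

def pvTags (g : List (List String)) (s : Int) : List (String × (Int × Int)) :=
  (PySem.List.enumerate g s).flatMap (fun p =>
    (PySem.List.enumerate p.2 0).map (fun q => (PySem.Str.lower q.2, (p.1, q.1))))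

theorem pvTags_nil (s : Int) : pvTags [] s = [] := by simp [pvTags, PySem.List.enumerate_nil]

theorem pvTags_cons (r : List String) (g : List (List String)) (s : Int) :
    pvTags (r :: g) s =
      (PySem.List.enumerate r 0).map (fun q => (PySem.Str.lower q.2, (s, q.1))) ++ pvTags g (s + 1) := by
  simp [pvTags, PySem.List.enumerate_cons]

theorem pvTags_append (x y : List (List String)) (s : Int) :
    pvTags (x ++ y) s = pvTags x s ++ pvTags y (s + x.length) := by
  simp [pvTags, PySem.List.enumerate_append]

theorem pvTags_keys (g : List (List String)) (s : Int) :
    (pvTags g s).map (·.1) = g.flatMap (fun r => r.map (fun w => PySem.Str.lower w)) := by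
  induction g generalizing s with
  | nil => simp [pvTags_nil]
  | cons r g ih =>
    rw [pvTags_cons]
    simp only [List.map_append, List.map_map, ih, List.flatMap_cons]
    congr 1
    have : ((PySem.List.enumerate r 0).map (·.2)).map (fun w => PySem.Str.lower w)
        = r.map (fun w => PySem.Str.lower w) := by rw [PySem.List.map_snd_enumerate]
    rw [← this, List.map_map]
    rfl

theorem pvTags_fst_ge (g : List (List String)) (s : Int) :
    ∀ t ∈ pvTags g s, s ≤ t.2.1 := by
  induction g generalizing s with
  | nil => simp [pvTags_nil]
  | cons r g ih =>
    rw [pvTags_cons]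
    intro t ht
    rcases List.mem_append.1 ht with h | h
    · obtain ⟨q, _, hq⟩ := List.mem_map.1 h
      subst hq; simp
    · have := ih (s + 1) t h; omega

theorem pvTags_pos_nodup (g : List (List String)) (s : Int) :
    ((pvTags g s).map (·.2)).Nodup := by
  induction g generalizing s with
  | nil => simp [pvTags_nil]
  | cons r g ih =>
    rw [pvTags_cons]
    rw [List.map_append, List.nodup_append]
    refine ⟨?_, ih (s + 1), ?_⟩
    · rw [List.map_map]
      have hpw := PySem.List.pairwise_lt_enumerate r (s := 0)
      have : List.Pairwise (fun a b => a ≠ b)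
          ((PySem.List.enumerate r 0).map ((·.2) ∘ fun q => (PySem.Str.lower q.2, (s, q.1)))) := by
        refine List.Pairwise.map _ ?_ hpw
        intro a b hab
        simp only [Function.comp]
        intro hc
        have : a.1 = b.1 := congrArg Prod.snd hc
        omega
      exact this
    · intro a ha b hb
      obtain ⟨q, hqm, hq⟩ := List.mem_map.1 ha
      obtain ⟨u, _, huq⟩ := List.mem_map.1 hqm
      obtain ⟨t, ht, hts⟩ := List.mem_map.1 hb
      have := pvTags_fst_ge g (s + 1) t ht
      subst hq hts huq
      intro hc
      have : s = t.2.1 := congrArg Prod.fst hc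
      omega

def pvPreK (g : List (List String)) (i j : Nat) : List String :=
  (g.take i).flatMap (fun r => r.map (fun w => PySem.Str.lower w)) ++
    ((g.getD i []).take j).map (fun w => PySem.Str.lower w)

theorem pv_decomp (g : List (List String)) (i j : Nat) (hi : i < g.length)
    (hj : j < (g[i]'hi).length) :
    ∃ t₁ t₂, pvTags g 0 = t₁ ++ (PySem.Str.lower ((g[i]'hi)[j]'hj), ((i : Int), (j : Int))) :: t₂
      ∧ t₁.map (·.1) = pvPreK g i j := by
  have hg : g = g.take i ++ g[i] :: g.drop (i + 1) := by
    conv_lhs => rw [← List.take_append_drop i g]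
    rw [List.getElem_cons_drop]
  have hr : g[i] = (g[i]'hi).take j ++ (g[i]'hi)[j] :: (g[i]'hi).drop (j + 1) := by
    conv_lhs => rw [← List.take_append_drop j (g[i]'hi)]
    rw [List.getElem_cons_drop]
  refine ⟨pvTags (g.take i) 0 ++
    (PySem.List.enumerate ((g[i]'hi).take j) 0).map
      (fun q => (PySem.Str.lower q.2, ((i : Int), q.1))), ?_, ?_, ?_⟩
  · exact ((PySem.List.enumerate ((g[i]'hi).drop (j + 1)) ((j : Int) + 1)).map
      (fun q => (PySem.Str.lower q.2, ((i : Int), q.1)))) ++ pvTags (g.drop (i + 1)) ((i : Int) + 1)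
  · conv_lhs => rw [hg]
    rw [pvTags_append, pvTags_cons]
    have hlen : ((g.take i).length : Int) = (i : Int) := by
      rw [List.length_take_of_le hi.le]
    rw [hlen]
    simp only [zero_add]
    conv_lhs => rw [hr]
    rw [PySem.List.enumerate_append]
    have hlen2 : ((0 : Int) + ((g[i]'hi).take j).length) = (j : Int) := by
      rw [List.length_take_of_le hj.le]; omega
    rw [hlen2, PySem.List.enumerate_cons, List.map_append, List.map_cons]
    simp [List.append_assoc]
  · rw [List.map_append, pvTags_keys, List.map_map, pvPreK]
    congr 1
    · rw [List.getD_eq_getElem g [] hi]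
      have : ((PySem.List.enumerate ((g[i]'hi).take j) 0).map (·.2)).map
          (fun w => PySem.Str.lower w) = ((g[i]'hi).take j).map (fun w => PySem.Str.lower w) := by
        rw [PySem.List.map_snd_enumerate]
      rw [← this, List.map_map]
      rfl

theorem pvTags_inR (g : List (List String)) (s : Int) :
    ∀ t ∈ pvTags g s, ∃ a b : Nat, t.2 = (s + (a : Int), (b : Int)) ∧ a < g.length ∧
      ∃ (ha : a < g.length), b < (g[a]'ha).length := by
  induction g generalizing s with
  | nil => simp [pvTags_nil]
  | cons r g ih =>
    rw [pvTags_cons]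
    intro t ht
    rcases List.mem_append.1 ht with h | h
    · obtain ⟨q, hq, hqt⟩ := List.mem_map.1 h
      obtain ⟨b, hb, hbq⟩ := (PySem.List.mem_enumerate_iff _ _ _).1 hq
      refine ⟨0, b, ?_, by simp, by simp, ?_⟩
      · subst hqt hbq; simp
      · simpa using hb
    · obtain ⟨a, b, hab, ha, ha2, hb⟩ := ih (s + 1) t h
      exact ⟨a + 1, b, by rw [hab]; push_cast; ring_nf, by simpa using ha,
        by simpa using ha, by simpa using hb⟩

def pvEnt (sl : List (List String)) (a b : Int) : String :=
  PySem.List.pyGetD (PySem.List.pyGetD sl a []) b "."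

def pvInR (sl : List (List String)) (p : Int × Int) : Prop :=
  ∃ i j : Nat, p = ((i : Int), (j : Int)) ∧ i < sl.length ∧
    j < (PySem.List.pyGetD sl (i : Int) []).length

theorem pvStep_len {sl p} (_h : pvInR sl p) : (pvStep sl p).length = sl.length := by
  simp [pvStep, PySem.List.length_pySetD]

theorem pvStep_row {sl p} (h : pvInR sl p) (a : Nat) :
    (PySem.List.pyGetD (pvStep sl p) (a : Int) []).length =
      (PySem.List.pyGetD sl (a : Int) []).length := by
  obtain ⟨i, j, hp, hi, hj⟩ := h
  subst hp
  show (PySem.List.pyGetD (PySem.List.pySetD sl ((i : Nat) : Int)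
    (PySem.List.pySetD (PySem.List.pyGetD sl ((i : Nat) : Int) []) ((j : Nat) : Int) ".")) (a : Int) []).length = _
  rw [PySem.List.pyGetD_pySetD_natCast _ _ _ _ _ hi]
  split_ifs with hai
  · rw [PySem.List.length_pySetD, hai]
  · rfl

theorem pvStep_ent {sl p} (h : pvInR sl p) (a b : Nat) :
    pvEnt (pvStep sl p) (a : Int) (b : Int) =
      if ((a : Int), (b : Int)) = p then "." else pvEnt sl (a : Int) (b : Int) := by
  obtain ⟨i, j, hp, hi, hj⟩ := h
  subst hp
  show PySem.List.pyGetD (PySem.List.pyGetD (PySem.List.pySetD sl ((i : Nat) : Int)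
    (PySem.List.pySetD (PySem.List.pyGetD sl ((i : Nat) : Int) []) ((j : Nat) : Int) ".")) (a : Int) []) (b : Int) "." = _
  rw [PySem.List.pyGetD_pySetD_natCast _ _ _ _ _ hi]
  split_ifs with hai hab hab
  · rw [PySem.List.pyGetD_pySetD_natCast _ _ _ _ _ hj,
      if_pos (by have := congrArg Prod.snd hab; simpa using this)]
  · rw [PySem.List.pyGetD_pySetD_natCast _ _ _ _ _ hj,
      if_neg (by intro hc; exact hab (by rw [hai, hc]))]
    rw [pvEnt, hai]
  · exact absurd (by have := congrArg Prod.fst hab; simp only [] at this; exact_mod_cast this) hai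
  · rfl

theorem pvStep_inR {sl p q} (h : pvInR sl p) (hq : pvInR sl q) : pvInR (pvStep sl p) q := by
  obtain ⟨i, j, hp, hi, hj⟩ := hq
  exact ⟨i, j, hp, by rw [pvStep_len h]; exact hi, by rw [pvStep_row h]; exact hj⟩

theorem pvApp_ent (ps : List (Int × Int)) : ∀ sl, (∀ p ∈ ps, pvInR sl p) → ∀ a b : Nat,
    pvEnt (ps.foldl pvStep sl) (a : Int) (b : Int) =
      if ((a : Int), (b : Int)) ∈ ps then "." else pvEnt sl (a : Int) (b : Int) := by
  induction ps with
  | nil => intro sl _ a b; simp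
  | cons p ps ih =>
    intro sl h a b
    have hp := h p (by simp)
    rw [List.foldl_cons, ih _ (fun q hq => pvStep_inR hp (h q (by simp [hq]))) a b,
      pvStep_ent hp a b]
    by_cases hm : ((a : Int), (b : Int)) ∈ ps
    · rw [if_pos hm, if_pos (by simp [hm])]
    · rw [if_neg hm]
      by_cases he : ((a : Int), (b : Int)) = p
      · rw [if_pos he, if_pos (by simp [he])]
      · rw [if_neg he, if_neg (by simp only [List.mem_cons]; push Not; exact ⟨he, hm⟩)]

theorem pvApp_shape (ps : List (Int × Int)) : ∀ sl, (∀ p ∈ ps, pvInR sl p) →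
    (ps.foldl pvStep sl).length = sl.length ∧
      ∀ a : Nat, (PySem.List.pyGetD (ps.foldl pvStep sl) (a : Int) []).length =
        (PySem.List.pyGetD sl (a : Int) []).length := by
  induction ps with
  | nil => intro sl _; exact ⟨rfl, fun _ => rfl⟩
  | cons p ps ih =>
    intro sl h
    have hp := h p (by simp)
    obtain ⟨h1, h2⟩ := ih _ (fun q hq => pvStep_inR hp (h q (by simp [hq])))
    exact ⟨by rw [List.foldl_cons, h1, pvStep_len hp],
      fun a => by rw [List.foldl_cons, h2 a, pvStep_row hp]⟩


def pvMarkRow (pre : List String) : List String → (List String × List String)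
  | [] => (pre, [])
  | w :: ws =>
    let r := pvMarkRow (pre ++ [PySem.Str.lower w]) ws
    (r.1, (if PySem.Str.lower w ∈ pre then "." else w) :: r.2)

def pvMarkGrid (pre : List String) : List (List String) → List (List String)
  | [] => []
  | r :: g => (pvMarkRow pre r).2 :: pvMarkGrid (pvMarkRow pre r).1 g

theorem pvMarkRow_fst (r : List String) : ∀ pre,
    (pvMarkRow pre r).1 = pre ++ r.map (fun w => PySem.Str.lower w) := by
  induction r with
  | nil => intro pre; simp [pvMarkRow]
  | cons w ws ih => intro pre; simp [pvMarkRow, ih]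

theorem pvMarkRow_len (r : List String) : ∀ pre, (pvMarkRow pre r).2.length = r.length := by
  induction r with
  | nil => intro pre; simp [pvMarkRow]
  | cons w ws ih => intro pre; simp [pvMarkRow, ih]

theorem pvMarkRow_ent (r : List String) : ∀ pre (j : Nat) (hj : j < r.length),
    (pvMarkRow pre r).2[j]'(by rw [pvMarkRow_len]; exact hj) =
      if PySem.Str.lower (r[j]'hj) ∈ pre ++ (r.take j).map (fun w => PySem.Str.lower w)
      then "." else r[j]'hj := by
  induction r with
  | nil => intro pre j hj; simp at hj
  | cons w ws ih =>
    intro pre j hj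
    cases j with
    | zero => simp [pvMarkRow]
    | succ j =>
      have hj' : j < ws.length := by simpa using hj
      have := ih (pre ++ [PySem.Str.lower w]) j hj'
      simp only [pvMarkRow, List.getElem_cons_succ]
      rw [this]
      simp [List.append_assoc]

theorem pvMarkGrid_len (g : List (List String)) : ∀ pre, (pvMarkGrid pre g).length = g.length := by
  induction g with
  | nil => intro pre; simp [pvMarkGrid]
  | cons r g ih => intro pre; simp [pvMarkGrid, ih]

theorem pvMarkGrid_rowlen (g : List (List String)) : ∀ pre (i : Nat) (hi : i < g.length),
    ((pvMarkGrid pre g)[i]'(by rw [pvMarkGrid_len]; exact hi)).length = (g[i]'hi).length := by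
  induction g with
  | nil => intro pre i hi; simp at hi
  | cons r g ih =>
    intro pre i hi
    cases i with
    | zero => simp [pvMarkGrid, pvMarkRow_len]
    | succ i => simpa [pvMarkGrid] using ih (pvMarkRow pre r).1 i (by simpa using hi)

theorem pvMarkGrid_ent (g : List (List String)) : ∀ pre (i j : Nat) (hi : i < g.length)
    (hj : j < (g[i]'hi).length),
    ((pvMarkGrid pre g)[i]'(by rw [pvMarkGrid_len]; exact hi))[j]'(by rw [pvMarkGrid_rowlen]; exact hj) =
      if PySem.Str.lower ((g[i]'hi)[j]'hj) ∈ pre ++ pvPreK g i j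
      then "." else (g[i]'hi)[j]'hj := by
  induction g with
  | nil => intro pre i j hi; simp at hi
  | cons r g ih =>
    intro pre i j hi hj
    cases i with
    | zero =>
      simp only [pvMarkGrid, List.getElem_cons_zero]
      rw [pvMarkRow_ent r pre j (by simpa using hj)]
      simp only [pvPreK, List.take_zero, List.flatMap_nil, List.nil_append, List.getD_cons_zero,
        List.map_take]
      rfl
    | succ i =>
      have hi' : i < g.length := by simpa using hi
      simp only [pvMarkGrid, List.getElem_cons_succ]
      rw [ih (pvMarkRow pre r).1 i j hi' (by simpa using hj)]
      rw [pvMarkRow_fst]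
      have : (pre ++ r.map (fun w => PySem.Str.lower w)) ++ pvPreK g i j =
          pre ++ pvPreK (r :: g) (i + 1) j := by
        simp [pvPreK, List.append_assoc]
      rw [this]
      rfl

theorem pvEnt_eq (sl : List (List String)) (i j : Nat) (hi : i < sl.length)
    (hj : j < (sl[i]'hi).length) : pvEnt sl (i : Int) (j : Int) = (sl[i]'hi)[j]'hj := by
  rw [pvEnt, PySem.List.pyGetD_natCast, PySem.List.pyGetD_natCast,
    List.getD_eq_getElem sl [] hi, List.getD_eq_getElem _ "." hj]

theorem pvRowLen_eq (sl : List (List String)) (i : Nat) (hi : i < sl.length) :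
    (PySem.List.pyGetD sl (i : Int) []).length = (sl[i]'hi).length := by
  rw [PySem.List.pyGetD_natCast, List.getD_eq_getElem sl [] hi]

theorem pvDup_inR (g : List (List String)) : ∀ p ∈ pvDup (pvTags g 0), pvInR g p := by
  intro p hp
  obtain ⟨x, hx, hpx⟩ := List.mem_flatten.1 hp
  obtain ⟨w, _, hxw⟩ := List.mem_map.1 hx
  subst hxw
  obtain ⟨e, he, _, h2⟩ := pvGrp_mem (List.mem_of_mem_drop hpx)
  obtain ⟨a, b, hab, ha, ha2, hb⟩ := pvTags_inR g 0 e he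
  refine ⟨a, b, by rw [← h2, hab]; simp, ha, ?_⟩
  rw [pvRowLen_eq g a ha]
  exact hb

theorem pv_grids_eq (g : List (List String)) :
    (pvDup (pvTags g 0)).foldl pvStep g = pvMarkGrid [] g := by
  have hin := pvDup_inR g
  obtain ⟨hlen, hrow⟩ := pvApp_shape _ g hin
  have hmglen := pvMarkGrid_len g []
  apply List.ext_getElem (by rw [hlen, hmglen])
  intro i hi1 hi2
  have hiG : i < g.length := by rw [← hlen]; exact hi1
  have hrl : (((pvDup (pvTags g 0)).foldl pvStep g)[i]'hi1).length = (g[i]'hiG).length := by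
    rw [← pvRowLen_eq _ i hi1, hrow i, pvRowLen_eq g i hiG]
  apply List.ext_getElem (by rw [hrl, pvMarkGrid_rowlen g [] i hiG])
  intro j hj1 hj2
  have hjG : j < (g[i]'hiG).length := by rw [← hrl]; exact hj1
  have lhs : (((pvDup (pvTags g 0)).foldl pvStep g)[i]'hi1)[j]'hj1 =
      pvEnt ((pvDup (pvTags g 0)).foldl pvStep g) (i : Int) (j : Int) :=
    (pvEnt_eq _ i j hi1 hj1).symm
  rw [lhs, pvApp_ent _ g hin i j, pvMarkGrid_ent g [] i j hiG hjG]
  obtain ⟨t₁, t₂, hdec, hkeys⟩ := pv_decomp g i j hiG hjG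
  have hnd := pvTags_pos_nodup g 0
  rw [hdec] at hnd
  rw [hdec, pvEnt_eq g i j hiG hjG]
  simp only [pv_mem_dup hnd, hkeys, List.nil_append]
  rfl

def pvIStep (st2 : PySem.Set String × List String) (w : String) : PySem.Set String × List String :=
  let lc := PySem.Str.lower w
  if st2.1.contains lc then (st2.1, st2.2 ++ ["."])
  else (PySem.Set.add st2.1 lc, st2.2 ++ [w])

theorem pvB_row (row : List String) : ∀ (s : PySem.Set String) (pre ws : List String),
    (∀ x, x ∈ s ↔ x ∈ pre) →
    (row.foldl pvIStep (s, ws)).2 = ws ++ (pvMarkRow pre row).2 ∧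
      ∀ x, x ∈ (row.foldl pvIStep (s, ws)).1 ↔ x ∈ (pvMarkRow pre row).1 := by
  induction row with
  | nil => intro s pre ws h; simpa [pvMarkRow] using h
  | cons w ws ih =>
    intro s pre acc h
    simp only [List.foldl_cons, pvMarkRow, pvIStep]
    by_cases hm : PySem.Str.lower w ∈ pre
    · have hc : s.contains (PySem.Str.lower w) = true := by
        rw [PySem.Set.contains_iff]; exact (h _).2 hm
      rw [hc]
      simp only [if_pos hm]
      have := ih s (pre ++ [PySem.Str.lower w]) (acc ++ ["."])
        (by intro x; rw [h x]; simp; intro hx; subst hx; exact hm)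
      simpa using this
    · have hc : s.contains (PySem.Str.lower w) = false := by
        rw [Bool.eq_false_iff, Ne, PySem.Set.contains_iff]
        intro hx; exact hm ((h _).1 hx)
      rw [hc]
      simp only [if_neg hm, Bool.false_eq_true, if_false]
      have := ih (PySem.Set.add s (PySem.Str.lower w)) (pre ++ [PySem.Str.lower w]) (acc ++ [w])
        (by intro x; rw [PySem.Set.mem_add, h x]; simp)
      simpa using this

def pvOStep (st : PySem.Set String × List String) (row : List String) :
    PySem.Set String × List String :=
  let inner := row.foldl pvIStep (st.1, [])
  (inner.1, st.2 ++ [PySem.Str.join " " inner.2])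

theorem pvB_grid (g : List (List String)) : ∀ (s : PySem.Set String) (pre out : List String),
    (∀ x, x ∈ s ↔ x ∈ pre) →
    (g.foldl pvOStep (s, out)).2 = out ++ (pvMarkGrid pre g).map (PySem.Str.join " ") := by
  induction g with
  | nil => intro s pre out h; simp [pvMarkGrid]
  | cons r g ih =>
    intro s pre out h
    obtain ⟨h2, h1⟩ := pvB_row r s pre [] h
    simp only [List.foldl_cons, pvOStep, pvMarkGrid, List.map_cons]
    rw [h2]
    have := ih (r.foldl pvIStep (s, [])).1 (pvMarkRow pre r).1 (out ++ [PySem.Str.join " " ((pvMarkRow pre r).2)]) h1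
    simpa using this

theorem pvDict_eq (g : List (List String)) :
    ((PySem.List.enumerate g 0).foldl (fun d p =>
      (PySem.List.enumerate p.2 0).foldl (fun d q =>
        d.modify (PySem.Str.lower q.2) [] (fun l => l ++ [(p.1, q.1)])) d) PySem.Dict.empty)
    = (pvTags g 0).foldl (fun d t => d.modify t.1 [] (fun l => l ++ [t.2])) PySem.Dict.empty := by
  rw [pvTags, List.foldl_flatMap]
  congr 1
  funext d p
  rw [List.foldl_map]

theorem pvA_eq (lines : List String) :
    solve lines = ((pvDup (pvTags (lines.map (fun line => PySem.Str.split₀ line)) 0)).foldl pvStep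
      (lines.map (fun line => PySem.Str.split₀ line))).map (fun line => PySem.Str.join " " line) := by
  unfold solve
  simp only []
  rw [pvDict_eq]
  -- duplicates loop
  rw [show ∀ (ed : PySem.Dict String (List (Int × Int))),
      ed.keys.foldl (fun acc w =>
        if (ed.getD w []).length > 1 then acc ++ [(ed.getD w []).drop 1] else acc) [] =
      (ed.keys.filter (fun w => (ed.getD w []).length > 1)).map (fun w => (ed.getD w []).drop 1)
    from fun ed => by
      simpa using PySem.List.foldl_append_ite (fun w => (ed.getD w []).length > 1)
        (fun w => (ed.getD w []).drop 1) ed.keys []]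
  rw [show (fun (sl : List (List String)) (dup : List (Int × Int)) =>
      let sl1 := if dup.length > 1 then
        (PySem.List.enumerate dup 0).foldl (fun sl e =>
          let p := PySem.List.pyGetD dup e.1 (0, 0)
          PySem.List.pySetD sl p.1 (PySem.List.pySetD (PySem.List.pyGetD sl p.1 []) p.2 ".")) sl
      else sl
      let sl2 := if dup.length == 1 then
        let p := PySem.List.pyGetD dup 0 (0, 0)
        PySem.List.pySetD sl1 p.1 (PySem.List.pySetD (PySem.List.pyGetD sl1 p.1 []) p.2 ".")
      else sl1
      sl2) = (fun sl dup => dup.foldl pvStep sl) from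
    funext fun sl => funext fun dup => pvGroupApp dup sl]
  rw [← List.foldl_flatten]
  rw [PySem.Dict.keys_foldl_modify_key (pvTags (lines.map (fun line => PySem.Str.split₀ line)) 0)
    (fun t => t.1) [] (fun _ t l => l ++ [t.2]) PySem.Dict.empty]
  simp only [PySem.Dict.getD_foldl_modify_append]
  simp only [pvDup, pvGrp]
  rw [show PySem.Set.update PySem.Dict.empty.keys
      ((pvTags (lines.map (fun line => PySem.Str.split₀ line)) 0).map (fun t => t.1)) =
    PySem.Set.ofList ((pvTags (lines.map (fun line => PySem.Str.split₀ line)) 0).map (fun t => t.1))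
    from PySem.Set.update_nil_left _]
  rfl

theorem pvB_eq (lines : List String) :
    solve_alt lines = (pvMarkGrid [] (lines.map (fun line => PySem.Str.split₀ line))).map
      (PySem.Str.join " ") := by
  have h0 : ∀ x : String, x ∈ (PySem.Set.empty : PySem.Set String) ↔ x ∈ ([] : List String) := by
    intro x; simp [PySem.Set.empty]
  have hg := pvB_grid (lines.map (fun line => PySem.Str.split₀ line)) PySem.Set.empty [] [] h0
  have hfold : solve_alt lines =
      ((lines.map (fun line => PySem.Str.split₀ line)).foldl pvOStep (PySem.Set.empty, [])).2 := by
    rw [solve_alt, List.foldl_map]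
    rfl
  rw [hfold, hg]
  rfl

-- ===== VERDICT (by name: the statement is the Claim_ definition above) =====
theorem solve_spec : Claim_equal_solve := by
  intro lines _
  unfold Spec_solve
  rw [pvA_eq lines, pvB_eq lines, pv_grids_eq]
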